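-- pv_equiv track=rewrite | github.com/jet-c-21/DM-Practice | 4.5/c_isbn.py | check_upc
-- ===== SOURCE A (Python) =====
-- def check_upc(product_code: str, m=11):
--     s = 0
--     for i in range(1, len(product_code) + 1):
--         c = product_code[i - 1]
--         if c.isnumeric():
--             s += i * int(c)
--         else:
--             if c == 'X':
--                 s += i * 10
--
--     if s % m == 0:
--         return True
--     else:
--         return False
-- ===== SOURCE B (Python) =====
-- def check_upc(product_code: str, m=11):
--     # Right-to-left pass: sum of suffix sums equals the index-weighted sum,
--     # so no index multiplication is needed.
--     total = 0
--     suffix = 0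
--     for c in reversed(product_code):
--         if c.isnumeric():
--             suffix += int(c)
--         elif c == 'X':
--             suffix += 10
--         total += suffix
--     return total % m == 0
-- ===== Notes on version B (the rewrite author's own statement) =====
-- stated objective: alternative
-- what changed: B walks the string right-to-left keeping a running suffix sum and adds it to a total (sum_i i*a_i = sum of suffix sums), eliminating the index multiplication and the explicit range/index loop of A.
import Mathlib
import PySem

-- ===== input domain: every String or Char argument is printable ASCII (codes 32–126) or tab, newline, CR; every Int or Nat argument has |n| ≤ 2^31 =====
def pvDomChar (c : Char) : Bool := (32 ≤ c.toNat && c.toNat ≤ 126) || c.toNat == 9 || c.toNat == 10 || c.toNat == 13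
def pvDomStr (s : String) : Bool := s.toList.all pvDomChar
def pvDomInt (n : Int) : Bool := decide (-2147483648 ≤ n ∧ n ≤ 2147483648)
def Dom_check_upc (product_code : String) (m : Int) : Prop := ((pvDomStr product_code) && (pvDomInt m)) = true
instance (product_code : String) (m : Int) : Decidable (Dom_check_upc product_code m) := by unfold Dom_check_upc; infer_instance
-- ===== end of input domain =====

-- B replaces A's index-weighted sum (1-based range loop with i*value products) by a
-- right-to-left pass maintaining a running suffix sum whose totals add up to the same
-- weighted sum; objective: alternative (same cost, no index multiplication).

-- ===== PORT A =====
-- c.isnumeric() is ported as '0' ≤ c ∧ c ≤ '9' and int(c) as c.toNat - 48: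
-- exact on the printable-ASCII domain Dom_check_upc.
def check_upc (product_code : String) (m : Int) : Bool :=
  let cs := product_code.toList
  let s := (PySem.List.pyRange 1 ((cs.length : Int) + 1) 1).foldl
    (fun s i =>
      let c := PySem.List.pyGetD cs (i - 1) ' '
      if '0' ≤ c ∧ c ≤ '9' then s + i * ((c.toNat : Int) - 48)
      else if c = 'X' then s + i * 10
      else s) 0
  decide (PySem.Int.mod s m = 0)

-- ===== PORT B =====
-- 'for c in reversed(product_code)' carrying (total, suffix) is the foldr over the list.
def check_upc_alt (product_code : String) (m : Int) : Bool :=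
  let p := product_code.toList.foldr
    (fun c (acc : Int × Int) =>
      let suf := if '0' ≤ c ∧ c ≤ '9' then acc.2 + ((c.toNat : Int) - 48)
                 else if c = 'X' then acc.2 + 10
                 else acc.2
      (acc.1 + suf, suf)) (0, 0)
  decide (PySem.Int.mod p.1 m = 0)

-- ===== PRECONDITION & SPEC =====
-- Pre_ excludes only m = 0, on which both Pythons raise ZeroDivisionError at the modulo.
def Pre_check_upc (product_code : String) (m : Int) : Prop := m ≠ 0
instance (product_code : String) (m : Int) : Decidable (Pre_check_upc product_code m) := by unfold Pre_check_upc; infer_instance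
def pvWitness_check_upc : String × Int := ("036000291452", 11)

def Spec_check_upc (product_code : String) (m : Int) (out : Bool) : Prop := out = check_upc_alt product_code m
instance (product_code : String) (m : Int) (out : Bool) : Decidable (Spec_check_upc product_code m out) := by unfold Spec_check_upc; infer_instance

-- ===== CLAIM (what is proved, stated in full; the proofs are below) =====
def Claim_equal_check_upc : Prop := ∀ (product_code : String) (m : Int), Dom_check_upc product_code m → Pre_check_upc product_code m → Spec_check_upc product_code m (check_upc product_code m)

-- ===== LEMMAS AND PROOFS =====

def pvVal (c : Char) : Int :=
  if '0' ≤ c ∧ c ≤ '9' then (c.toNat : Int) - 48 else if c = 'X' then 10 else 0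

def pvS : List Char → Int
  | [] => 0
  | c :: r => pvVal c + pvS r

def pvT : List Char → Int
  | [] => 0
  | c :: r => pvT r + (pvS r + pvVal c)

def pvTShift : List Char → Nat → Int
  | [], _ => 0
  | c :: r, k => ((k : Int) + 1) * pvVal c + pvTShift r (k + 1)

lemma loopA (xs : List Char) : ∀ (cs pre : List Char), xs = pre ++ cs → ∀ (s : Int),
    (PySem.List.pyRange ((pre.length : Int) + 1) ((pre.length : Int) + cs.length + 1) 1).foldl
      (fun s i =>
        let c := PySem.List.pyGetD xs (i - 1) ' '
        if '0' ≤ c ∧ c ≤ '9' then s + i * ((c.toNat : Int) - 48)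
        else if c = 'X' then s + i * 10
        else s) s
    = s + pvTShift cs pre.length := by
  intro cs
  induction cs with
  | nil =>
    intro pre h s
    have hr : PySem.List.pyRange ((pre.length : Int) + 1) ((pre.length : Int) + ([] : List Char).length + 1) 1 = [] := by
      simp [PySem.List.pyRange]
    rw [hr]
    simp [pvTShift]
  | cons c r ih =>
    intro pre h s
    have hlt : ((pre.length : Int) + 1) < (pre.length : Int) + (c :: r).length + 1 := by
      simp
    rw [PySem.List.pyRange_one_cons hlt]
    simp only [List.foldl_cons]
    have hget : PySem.List.pyGetD xs (((pre.length : Int) + 1) - 1) ' ' = c := by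
      have he : ((pre.length : Int) + 1) - 1 = ((pre.length : Nat) : Int) := by omega
      rw [he, PySem.List.pyGetD_natCast, h]
      simp
    have hstep : ∀ (t : Int),
        (let cc := PySem.List.pyGetD xs (((pre.length : Int) + 1) - 1) ' '
         if '0' ≤ cc ∧ cc ≤ '9' then t + ((pre.length : Int) + 1) * ((cc.toNat : Int) - 48)
         else if cc = 'X' then t + ((pre.length : Int) + 1) * 10
         else t) = t + ((pre.length : Int) + 1) * pvVal c := by
      intro t
      simp only [hget, pvVal]
      split_ifs <;> ring
    rw [hstep]
    have hlen : ((pre.length : Int) + 1) = (((pre ++ [c]).length : Nat) : Int) := by simp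
    have hlen2 : (pre.length : Int) + ((c :: r).length : Int) + 1
        = (((pre ++ [c]).length : Nat) : Int) + (r.length : Int) + 1 := by
      simp
      omega
    rw [hlen, hlen2, ih (pre ++ [c]) (by simp [h])]
    rw [pvTShift]
    simp
    ring

lemma foldrB (cs : List Char) :
    cs.foldr (fun c (acc : Int × Int) =>
      let suf := if '0' ≤ c ∧ c ≤ '9' then acc.2 + ((c.toNat : Int) - 48)
                 else if c = 'X' then acc.2 + 10
                 else acc.2
      (acc.1 + suf, suf)) (0, 0) = (pvT cs, pvS cs) := by
  induction cs with
  | nil => rfl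
  | cons c r ih =>
    simp only [List.foldr_cons, ih, pvT, pvS, pvVal]
    split_ifs <;> simp <;> ring

lemma tShift_eq (cs : List Char) : ∀ k, pvTShift cs k = pvT cs + (k : Int) * pvS cs := by
  induction cs with
  | nil => intro k; simp [pvTShift, pvT, pvS]
  | cons c r ih =>
    intro k
    simp only [pvTShift, pvT, pvS, ih]
    push_cast
    ring

-- ===== VERDICT (by name: the statement is the Claim_ definition above) =====
theorem check_upc_spec : Claim_equal_check_upc := by
  intro pc m _ _
  unfold Spec_check_upc check_upc check_upc_alt
  have hA := loopA pc.toList pc.toList [] rfl 0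
  simp only [List.length_nil, Nat.cast_zero, zero_add] at hA
  simp only [foldrB]
  rw [hA, tShift_eq]
  norm_num
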